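-- pv_equiv track=rewrite | github.com/Dejai/AdventOfCode | 2022/15/run.py | getNoBeaconCoords
-- ===== SOURCE A (Python) =====
-- def getNoBeaconCoords(source, distance):
--
--     coordinateSet = set()
--
--     # Get the X and Y values
--     # x1,y1 = source.split(",")
--     # x = int(x1)
--     # y = int(y1)
--
--     x,y = source
--
--     for idx in range(0,distance+1):
--
--         # How many columns to span
--         span = distance-idx
--
--         # Get rows above and below
--         rowAbove = y-idx
--         rowBelow = y+idx
--         for idx in range(x-span, x+(span+1)):
--             keyAbove = "{0},{1}".format(idx,rowAbove)
--             keyBelow = "{0},{1}".format(idx,rowBelow)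
--             coordinateSet.add(keyAbove)
--             coordinateSet.add(keyBelow)
--
--     coordinates = list(coordinateSet)
--     coordinates.sort()
--     return coordinates
-- ===== SOURCE B (Python) =====
-- def getNoBeaconCoords(source, distance):
--     # Decompose the diamond into concentric Manhattan rings and walk the
--     # perimeter of each ring (4 points per step), so every coordinate is
--     # produced exactly once in a plain list; no set/dedup needed.
--     x, y = source
--     coordinates = []
--     for r in range(0, distance + 1):
--         if r == 0:
--             coordinates.append("{0},{1}".format(x, y))
--         else:
--             for k in range(r):
--                 coordinates.append("{0},{1}".format(x + k, y + (r - k)))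
--                 coordinates.append("{0},{1}".format(x + (r - k), y - k))
--                 coordinates.append("{0},{1}".format(x - k, y - (r - k)))
--                 coordinates.append("{0},{1}".format(x - (r - k), y + k))
--     coordinates.sort()
--     return coordinates
-- ===== Notes on version B (the rewrite author's own statement) =====
-- stated objective: alternative
-- what changed: B replaces A's row-scan (two mirrored rows per offset, deduplicated through a set) by a decomposition into concentric Manhattan rings: for each radius r it walks the ring's perimeter (4 points per step), producing every coordinate exactly once in a plain list, then sorts.
import Mathlib
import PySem

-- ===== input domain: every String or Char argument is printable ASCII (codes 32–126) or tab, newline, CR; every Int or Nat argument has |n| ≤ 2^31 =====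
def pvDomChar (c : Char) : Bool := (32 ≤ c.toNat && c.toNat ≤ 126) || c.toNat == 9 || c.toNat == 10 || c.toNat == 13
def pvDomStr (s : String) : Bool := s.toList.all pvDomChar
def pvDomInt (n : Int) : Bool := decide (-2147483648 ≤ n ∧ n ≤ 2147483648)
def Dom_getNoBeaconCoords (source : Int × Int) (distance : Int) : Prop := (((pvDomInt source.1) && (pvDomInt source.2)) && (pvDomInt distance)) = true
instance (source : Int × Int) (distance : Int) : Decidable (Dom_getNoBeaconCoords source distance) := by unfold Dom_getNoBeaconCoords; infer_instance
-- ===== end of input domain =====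

-- B replaces A's mirrored-rows-into-a-set scan by a decomposition into concentric
-- Manhattan rings (a perimeter walk of each ring, 4 points per step); no set/dedup needed.


-- ===== PORT A =====
-- shared formatting helper: the Python "{0},{1}".format(a, b) — decimal digits, comma, decimal digits
-- (exact: str(int) is PySem.Int.toChars, the pieces are concatenated as code points)
def pvFmt (a b : Int) : String := String.ofList (PySem.Int.toChars a ++ ',' :: PySem.Int.toChars b)

def getNoBeaconCoords (source : Int × Int) (distance : Int) : List String :=
  let coordinateSet : PySem.Set String := PySem.Set.empty
  let x := source.1
  let y := source.2
  let coordinateSet :=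
    (PySem.List.pyRange 0 (distance + 1) 1).foldl (fun cs idx =>
      let span := distance - idx
      let rowAbove := y - idx
      let rowBelow := y + idx
      (PySem.List.pyRange (x - span) (x + (span + 1)) 1).foldl (fun cs2 j =>
        let keyAbove := pvFmt j rowAbove
        let keyBelow := pvFmt j rowBelow
        PySem.Set.add (PySem.Set.add cs2 keyAbove) keyBelow) cs) coordinateSet
  PySem.List.sorted coordinateSet (fun s => s) false

-- ===== PORT B =====
def getNoBeaconCoords_alt (source : Int × Int) (distance : Int) : List String :=
  let x := source.1
  let y := source.2
  let coordinates : List String :=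
    (PySem.List.pyRange 0 (distance + 1) 1).foldl (fun acc r =>
      if r = 0 then acc ++ [pvFmt x y]
      else (PySem.List.pyRange 0 r 1).foldl (fun a2 k =>
        a2 ++ [pvFmt (x + k) (y + (r - k))] ++ [pvFmt (x + (r - k)) (y - k)]
           ++ [pvFmt (x - k) (y - (r - k))] ++ [pvFmt (x - (r - k)) (y + k)]) acc) []
  PySem.List.sorted coordinates (fun s => s) false

-- ===== PRECONDITION & SPEC =====
def Spec_getNoBeaconCoords (source : Int × Int) (distance : Int) (out : List String) : Prop := out = getNoBeaconCoords_alt source distance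
instance (source : Int × Int) (distance : Int) (out : List String) : Decidable (Spec_getNoBeaconCoords source distance out) := by unfold Spec_getNoBeaconCoords; infer_instance

-- ===== CLAIM (what is proved, stated in full; the proofs are below) =====
def Claim_equal_getNoBeaconCoords : Prop := ∀ (source : Int × Int) (distance : Int), Dom_getNoBeaconCoords source distance → Spec_getNoBeaconCoords source distance (getNoBeaconCoords source distance)

-- ===== LEMMAS AND PROOFS =====

-- decimal digits, most significant first (the list Nat.toDigits 10 produces), in a
-- directly-recursive form convenient for induction
def pvRep (n : Nat) : List Char :=
  if n < 10 then [Nat.digitChar n] else pvRep (n / 10) ++ [Nat.digitChar (n % 10)]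
  termination_by n
  decreasing_by exact Nat.div_lt_self (by omega) (by omega)

theorem pvRep_eq_toDigitsCore (f : Nat) : ∀ (n : Nat) (l : List Char), 0 < f → n < 10 ^ f →
    Nat.toDigitsCore 10 f n l = pvRep n ++ l := by
  induction f with
  | zero => omega
  | succ f ih =>
    intro n l _ hn
    rw [Nat.toDigitsCore]
    by_cases h : n / 10 = 0
    · rw [if_pos h, pvRep, if_pos (by omega)]
      have : n % 10 = n := by omega
      simp [this]
    · have hp : (10:Nat) ^ (f + 1) = 10 ^ f * 10 := pow_succ 10 f
      have hf : 0 < f := by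
        by_contra hf
        have : f = 0 := by omega
        subst this
        simp at hn
        omega
      have hpos : 0 < (10:Nat) ^ f := Nat.pow_pos (by omega)
      have hr : pvRep n = pvRep (n / 10) ++ [Nat.digitChar (n % 10)] := by
        rw [pvRep, if_neg (by omega)]
      rw [if_neg h, ih (n / 10) _ hf (by omega), hr]
      simp

theorem toDigits_eq_pvRep (n : Nat) : Nat.toDigits 10 n = pvRep n := by
  have h1 : n < 10 ^ n := Nat.lt_pow_self (by omega)
  have h2 : (10:Nat) ^ n ≤ 10 ^ (n + 1) := Nat.pow_le_pow_right (by omega) (by omega)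
  simpa using pvRep_eq_toDigitsCore (n + 1) n [] (by omega) (by omega)

def pvDig (c : Char) : Nat := c.toNat - 48
def pvVal (l : List Char) : Nat := l.foldl (fun a c => a * 10 + pvDig c) 0

theorem pvVal_append (l : List Char) (c : Char) : pvVal (l ++ [c]) = pvVal l * 10 + pvDig c := by
  simp [pvVal, List.foldl_append]

theorem pvDig_digitChar (d : Nat) (h : d < 10) : pvDig (Nat.digitChar d) = d := by
  interval_cases d <;> decide

theorem pvVal_pvRep (n : Nat) : pvVal (pvRep n) = n := by
  induction n using Nat.strong_induction_on with
  | _ n ih =>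
    rw [pvRep]
    by_cases h : n < 10
    · rw [if_pos h]
      simp [pvVal, pvDig_digitChar n h]
    · rw [if_neg h, pvVal_append, ih (n / 10) (Nat.div_lt_self (by omega) (by omega)),
        pvDig_digitChar _ (by omega)]
      omega

theorem pvRep_mem (n : Nat) : ∀ c ∈ pvRep n, ∃ d, d < 10 ∧ c = Nat.digitChar d := by
  induction n using Nat.strong_induction_on with
  | _ n ih =>
    intro c hc
    rw [pvRep] at hc
    by_cases h : n < 10
    · rw [if_pos h] at hc; simp at hc; exact ⟨n, h, hc⟩
    · rw [if_neg h] at hc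
      rcases List.mem_append.mp hc with h1 | h1
      · exact ih (n / 10) (Nat.div_lt_self (by omega) (by omega)) c h1
      · simp at h1; exact ⟨n % 10, by omega, h1⟩

theorem pvRep_no_comma (n : Nat) : ',' ∉ pvRep n := by
  intro h
  obtain ⟨d, hd, he⟩ := pvRep_mem n ',' h
  interval_cases d <;> exact absurd he (by decide)

theorem pvRep_no_dash (n : Nat) : '-' ∉ pvRep n := by
  intro h
  obtain ⟨d, hd, he⟩ := pvRep_mem n '-' h
  interval_cases d <;> exact absurd he (by decide)

theorem toChars_eq (n : Int) :
    PySem.Int.toChars n = if n < 0 then '-' :: pvRep n.natAbs else pvRep n.toNat := by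
  simp [PySem.Int.toChars, toDigits_eq_pvRep]

theorem toChars_no_comma (n : Int) : ',' ∉ PySem.Int.toChars n := by
  rw [toChars_eq]
  split
  · simp [pvRep_no_comma]
  · exact pvRep_no_comma _

theorem pvRep_inj {a b : Nat} (h : pvRep a = pvRep b) : a = b := by
  have := pvVal_pvRep a
  rw [h, pvVal_pvRep] at this
  omega

theorem toChars_inj {a b : Int} (h : PySem.Int.toChars a = PySem.Int.toChars b) : a = b := by
  rw [toChars_eq, toChars_eq] at h
  split_ifs at h with h1 h2 h2
  · simp only [List.cons.injEq] at h
    have := pvRep_inj h.2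
    omega
  · exact absurd (h ▸ List.mem_cons_self (l := pvRep a.natAbs)) (pvRep_no_dash _)
  · exact absurd (h ▸ List.mem_cons_self (l := pvRep b.natAbs)) (pvRep_no_dash _)
  · have := pvRep_inj h
    omega

theorem comma_split : ∀ (l1 : List Char) (r1 : List Char) (l2 : List Char) (r2 : List Char),
    ',' ∉ l1 → ',' ∉ l2 → l1 ++ ',' :: r1 = l2 ++ ',' :: r2 → l1 = l2 ∧ r1 = r2 := by
  intro l1
  induction l1 with
  | nil =>
    intro r1 l2 r2 _ h2 h
    cases l2 with
    | nil => simpa using h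
    | cons c t =>
      simp at h
      exact absurd (h.1 ▸ List.mem_cons_self) h2
  | cons c t ih =>
    intro r1 l2 r2 h1 h2 h
    cases l2 with
    | nil =>
      simp at h
      exact absurd (h.1.symm ▸ List.mem_cons_self) h1
    | cons c' t' =>
      simp at h
      obtain ⟨he, ht⟩ := h
      have := ih r1 t' r2 (fun hm => h1 (List.mem_cons_of_mem _ hm))
        (fun hm => h2 (List.mem_cons_of_mem _ hm)) ht
      simp [he, this.1, this.2]

theorem pvFmt_inj {a b c d : Int} (h : pvFmt a b = pvFmt c d) : a = c ∧ b = d := by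
  have hl : PySem.Int.toChars a ++ ',' :: PySem.Int.toChars b
      = PySem.Int.toChars c ++ ',' :: PySem.Int.toChars d := by
    have := congrArg String.toList h
    simpa [pvFmt, String.toList_ofList] using this
  obtain ⟨h1, h2⟩ := comma_split _ _ _ _ (toChars_no_comma a) (toChars_no_comma c) hl
  exact ⟨toChars_inj h1, toChars_inj h2⟩

-- A-side: membership and nodup of the nested foldl of Set.add's
theorem mem_inner_fold (L : List Int) (f g : Int → String) :
    ∀ (s : PySem.Set String) (a : String),
    (a ∈ L.foldl (fun cs2 j => PySem.Set.add (PySem.Set.add cs2 (f j)) (g j)) s ↔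
      a ∈ s ∨ ∃ j ∈ L, a = f j ∨ a = g j) := by
  induction L with
  | nil => simp
  | cons v t ih =>
    intro s a
    simp only [List.foldl_cons, ih, PySem.Set.mem_add, List.mem_cons]
    constructor
    · rintro (((h | h) | h) | ⟨j, hj, h⟩)
      · exact Or.inl h
      · exact Or.inr ⟨v, Or.inl rfl, Or.inl h⟩
      · exact Or.inr ⟨v, Or.inl rfl, Or.inr h⟩
      · exact Or.inr ⟨j, Or.inr hj, h⟩
    · rintro (h | ⟨j, (rfl | hj), h⟩)
      · exact Or.inl (Or.inl (Or.inl h))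
      · rcases h with h | h
        · exact Or.inl (Or.inl (Or.inr h))
        · exact Or.inl (Or.inr h)
      · exact Or.inr ⟨j, hj, h⟩

theorem nodup_inner_fold (L : List Int) (f g : Int → String) :
    ∀ (s : PySem.Set String), s.Nodup →
    (L.foldl (fun cs2 j => PySem.Set.add (PySem.Set.add cs2 (f j)) (g j)) s).Nodup := by
  induction L with
  | nil => intro s hs; simpa using hs
  | cons v t ih =>
    intro s hs
    exact ih _ (PySem.Set.nodup_add _ _ (PySem.Set.nodup_add _ _ hs))

theorem mem_outer_fold (R : List Int) (K : Int → List Int) (f g : Int → Int → String) :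
    ∀ (s : PySem.Set String) (a : String),
    (a ∈ R.foldl (fun cs i => (K i).foldl
        (fun cs2 j => PySem.Set.add (PySem.Set.add cs2 (f i j)) (g i j)) cs) s ↔
      a ∈ s ∨ ∃ i ∈ R, ∃ j ∈ K i, a = f i j ∨ a = g i j) := by
  induction R with
  | nil => simp
  | cons v t ih =>
    intro s a
    simp only [List.foldl_cons, ih, mem_inner_fold, List.mem_cons]
    constructor
    · rintro ((h | ⟨j, hj, h⟩) | ⟨i, hi, hrest⟩)
      · exact Or.inl h
      · exact Or.inr ⟨v, Or.inl rfl, j, hj, h⟩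
      · exact Or.inr ⟨i, Or.inr hi, hrest⟩
    · rintro (h | ⟨i, (rfl | hi), hrest⟩)
      · exact Or.inl (Or.inl h)
      · exact Or.inl (Or.inr hrest)
      · exact Or.inr ⟨i, hi, hrest⟩

theorem nodup_outer_fold (R : List Int) (K : Int → List Int) (f g : Int → Int → String) :
    ∀ (s : PySem.Set String), s.Nodup →
    (R.foldl (fun cs i => (K i).foldl
        (fun cs2 j => PySem.Set.add (PySem.Set.add cs2 (f i j)) (g i j)) cs) s).Nodup := by
  induction R with
  | nil => intro s hs; simpa using hs
  | cons v t ih =>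
    intro s hs
    exact ih _ (nodup_inner_fold _ _ _ _ hs)

-- A's enumeration condition, rephrased as "offset (u, v) with |u| + |v| ≤ d"
theorem mem_A_iff (x y d : Int) (a : String) :
    ((∃ i ∈ PySem.List.pyRange 0 (d + 1) 1,
        ∃ j ∈ PySem.List.pyRange (x - (d - i)) (x + ((d - i) + 1)) 1,
          a = pvFmt j (y - i) ∨ a = pvFmt j (y + i)) ↔
      ∃ u v : Int, |u| + |v| ≤ d ∧ a = pvFmt (x + u) (y + v)) := by
  simp only [PySem.List.mem_pyRange_one]
  constructor
  · rintro ⟨i, hi, j, hj, h | h⟩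
    · refine ⟨j - x, -i, ?_, ?_⟩
      · have h1 : |j - x| ≤ d - i := abs_le.mpr ⟨by omega, by omega⟩
        have h2 : |(-i)| = i := by rw [abs_neg, abs_of_nonneg (by omega)]
        omega
      · rw [h]; congr 1 <;> omega
    · refine ⟨j - x, i, ?_, ?_⟩
      · have h1 : |j - x| ≤ d - i := abs_le.mpr ⟨by omega, by omega⟩
        have h2 : |i| = i := abs_of_nonneg (by omega)
        omega
      · rw [h]; congr 1 <;> omega
  · rintro ⟨u, v, hb, rfl⟩
    have hu := abs_nonneg u
    have hvn := abs_nonneg v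
    have huu := abs_le.mp (le_refl |u|)
    by_cases hv : 0 ≤ v
    · have hva : |v| = v := abs_of_nonneg hv
      exact ⟨v, by omega, x + u, by omega, Or.inr rfl⟩
    · have hva : |v| = -v := abs_of_neg (by omega)
      refine ⟨-v, by omega, x + u, by omega, Or.inl (by congr 1 <;> omega)⟩

-- B-side: the per-ring foldl of four appends flattens to a flatMap
theorem foldl_four (L : List Int) (e1 e2 e3 e4 : Int → String) :
    ∀ acc : List String,
    L.foldl (fun a k => a ++ [e1 k] ++ [e2 k] ++ [e3 k] ++ [e4 k]) acc
      = acc ++ L.flatMap (fun k => [e1 k, e2 k, e3 k, e4 k]) := by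
  induction L with
  | nil => simp
  | cons v t ih =>
    intro acc
    rw [List.foldl_cons, ih]
    simp

-- the perimeter offsets of the ring of radius R, as walked by B
def pvOffs (R : Int) : List (Int × Int) :=
  (PySem.List.pyRange 0 R 1).flatMap
    (fun k => [(k, R - k), (R - k, -k), (-k, -(R - k)), (-(R - k), k)])

theorem mem_pvOffs (R : Int) (hR : 1 ≤ R) (p : Int × Int) :
    p ∈ pvOffs R ↔ |p.1| + |p.2| = R := by
  obtain ⟨u, v⟩ := p
  simp only [pvOffs, List.mem_flatMap, PySem.List.mem_pyRange_one, List.mem_cons,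
    List.not_mem_nil, or_false, Prod.mk.injEq]
  constructor
  · rintro ⟨k, ⟨hk0, hkR⟩, h⟩
    rcases h with ⟨rfl, rfl⟩ | ⟨rfl, rfl⟩ | ⟨rfl, rfl⟩ | ⟨rfl, rfl⟩
    · rw [abs_of_nonneg hk0, abs_of_nonneg (by omega)]; omega
    · rw [abs_of_nonneg (by omega), abs_neg, abs_of_nonneg hk0]; omega
    · rw [abs_neg, abs_of_nonneg hk0, abs_neg, abs_of_nonneg (by omega)]; omega
    · rw [abs_neg, abs_of_nonneg (by omega), abs_of_nonneg hk0]; omega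
  · intro h
    have huu := abs_le.mp (le_refl |u|)
    have hvv := abs_le.mp (le_refl |v|)
    have hu := abs_nonneg u
    have hv := abs_nonneg v
    by_cases h1 : 0 ≤ u ∧ 1 ≤ v
    · refine ⟨u, ⟨h1.1, ?_⟩, Or.inl ⟨rfl, ?_⟩⟩ <;>
        [skip; skip] <;>
        (rw [abs_of_nonneg h1.1, abs_of_nonneg (by omega)] at h; omega)
    · by_cases h2 : 1 ≤ u ∧ v ≤ 0
      · refine ⟨-v, ⟨by omega, ?_⟩, Or.inr (Or.inl ⟨?_, by omega⟩)⟩ <;>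
          (rw [abs_of_nonneg (by omega), abs_of_nonpos h2.2] at h; omega)
      · by_cases h3 : u ≤ 0 ∧ v ≤ -1
        · refine ⟨-u, ⟨by omega, ?_⟩, Or.inr (Or.inr (Or.inl ⟨by omega, ?_⟩))⟩ <;>
            (rw [abs_of_nonpos h3.1, abs_of_nonpos (by omega)] at h; omega)
        · have h4 : u ≤ -1 ∧ 0 ≤ v := by
            rcases abs_cases u with ⟨he, _⟩ | ⟨he, _⟩ <;>
              rcases abs_cases v with ⟨he2, _⟩ | ⟨he2, _⟩ <;> omega
          refine ⟨v, ⟨h4.2, ?_⟩, Or.inr (Or.inr (Or.inr ⟨?_, rfl⟩))⟩ <;>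
            (rw [abs_of_nonpos (by omega), abs_of_nonneg h4.2] at h; omega)

theorem nodup_pvOffs (R : Int) : (pvOffs R).Nodup := by
  rw [pvOffs, List.nodup_flatMap]
  constructor
  · intro k hk
    rw [PySem.List.mem_pyRange_one] at hk
    simp only [List.nodup_cons, List.mem_cons, List.not_mem_nil,
      or_false, List.nodup_nil, and_true, Prod.mk.injEq, not_or, not_false_eq_true]
    omega
  · have hp := PySem.List.pairwise_lt_pyRange_one 0 R
    refine List.Pairwise.imp_of_mem ?_ hp
    intro p q hp' hq' hlt
    rw [PySem.List.mem_pyRange_one] at hp' hq'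
    intro a ha hb
    simp only [List.mem_cons, List.not_mem_nil, or_false] at ha hb
    rcases ha with rfl | rfl | rfl | rfl <;>
      (simp only [Prod.mk.injEq] at hb; omega)

-- proof-side recursive description of B's accumulated list: diamond of radius r as
-- ring r appended after the diamond of radius r-1
def pvPoints (x y : Int) : Nat → List String
  | 0 => [pvFmt x y]
  | Nat.succ r =>
    let R : Int := (r : Int) + 1
    let ring := (PySem.List.pyRange 0 R 1).foldl (fun acc k =>
      acc ++ [pvFmt (x + k) (y + (R - k))] ++ [pvFmt (x + (R - k)) (y - k)]
          ++ [pvFmt (x - k) (y - (R - k))] ++ [pvFmt (x - (R - k)) (y + k)]) []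
    pvPoints x y r ++ ring

-- B's foldl over r = 0..n accumulates exactly pvPoints x y n
theorem alt_fold_eq (x y : Int) (n : Nat) :
    (PySem.List.pyRange 0 ((n : Int) + 1) 1).foldl (fun acc r =>
      if r = 0 then acc ++ [pvFmt x y]
      else (PySem.List.pyRange 0 r 1).foldl (fun a2 k =>
        a2 ++ [pvFmt (x + k) (y + (r - k))] ++ [pvFmt (x + (r - k)) (y - k)]
           ++ [pvFmt (x - k) (y - (r - k))] ++ [pvFmt (x - (r - k)) (y + k)]) acc) []
      = pvPoints x y n := by
  induction n with
  | zero =>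
    rw [show ((0 : Nat) : Int) + 1 = 0 + 1 by omega, PySem.List.pyRange_one_singleton]
    simp [pvPoints]
  | succ n ih =>
    rw [show ((n + 1 : Nat) : Int) + 1 = ((n : Int) + 1) + 1 by push_cast; ring,
      PySem.List.pyRange_one_succ_right (by positivity), List.foldl_append, ih]
    simp only [List.foldl_cons, List.foldl_nil]
    rw [if_neg (by positivity), foldl_four]
    simp only [pvPoints]
    rw [foldl_four, List.nil_append]

-- membership in B's recursive diamond: exactly the offsets of Manhattan length ≤ r
theorem mem_pvPoints (x y : Int) (r : Nat) (a : String) :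
    a ∈ pvPoints x y r ↔ ∃ u v : Int, |u| + |v| ≤ (r : Int) ∧ a = pvFmt (x + u) (y + v) := by
  induction r with
  | zero =>
    simp only [pvPoints, List.mem_singleton, Nat.cast_zero]
    constructor
    · rintro rfl
      exact ⟨0, 0, by simp, by simp⟩
    · rintro ⟨u, v, hb, rfl⟩
      have hu := abs_nonneg u
      have hv := abs_nonneg v
      have hu0 : u = 0 := by rw [← abs_eq_zero]; omega
      have hv0 : v = 0 := by rw [← abs_eq_zero]; omega
      simp [hu0, hv0]
  | succ r ih =>
    have hring : ∀ b : String,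
        (b ∈ (PySem.List.pyRange 0 ((r : Int) + 1) 1).foldl (fun acc k =>
          acc ++ [pvFmt (x + k) (y + ((r : Int) + 1 - k))] ++ [pvFmt (x + ((r : Int) + 1 - k)) (y - k)]
              ++ [pvFmt (x - k) (y - ((r : Int) + 1 - k))] ++ [pvFmt (x - ((r : Int) + 1 - k)) (y + k)]) []) ↔
          ∃ u v : Int, |u| + |v| = (r : Int) + 1 ∧ b = pvFmt (x + u) (y + v) := by
      intro b
      rw [foldl_four, List.nil_append]
      constructor
      · intro hb
        rw [List.mem_flatMap] at hb
        obtain ⟨k, hk, hmem⟩ := hb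
        rw [PySem.List.mem_pyRange_one] at hk
        simp only [List.mem_cons, List.not_mem_nil, or_false] at hmem
        rcases hmem with rfl | rfl | rfl | rfl
        · refine ⟨k, (r : Int) + 1 - k, ?_, rfl⟩
          rw [abs_of_nonneg (by omega), abs_of_nonneg (by omega)]; omega
        · refine ⟨(r : Int) + 1 - k, -k, ?_, by congr 1 <;> omega⟩
          rw [abs_of_nonneg (by omega), abs_neg, abs_of_nonneg (by omega)]; omega
        · refine ⟨-k, -((r : Int) + 1 - k), ?_, by congr 1 <;> omega⟩
          rw [abs_neg, abs_of_nonneg (by omega), abs_neg, abs_of_nonneg (by omega)]; omega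
        · refine ⟨-((r : Int) + 1 - k), k, ?_, by congr 1 <;> omega⟩
          rw [abs_neg, abs_of_nonneg (by omega), abs_of_nonneg (by omega)]; omega
      · rintro ⟨u, v, hb, rfl⟩
        have := (mem_pvOffs ((r : Int) + 1) (by omega) (u, v)).mpr hb
        rw [pvOffs, List.mem_flatMap] at this
        obtain ⟨k, hk, hmem⟩ := this
        rw [List.mem_flatMap]
        refine ⟨k, hk, ?_⟩
        simp only [List.mem_cons, List.not_mem_nil, or_false,
          Prod.mk.injEq] at hmem ⊢
        rcases hmem with ⟨rfl, rfl⟩ | ⟨rfl, rfl⟩ | ⟨rfl, rfl⟩ | ⟨rfl, rfl⟩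
        · exact Or.inl rfl
        · exact Or.inr (Or.inl (by congr 1 <;> omega))
        · exact Or.inr (Or.inr (Or.inl (by congr 1 <;> omega)))
        · exact Or.inr (Or.inr (Or.inr (by congr 1 <;> omega)))
    simp only [pvPoints, List.mem_append, ih, hring, Nat.cast_succ]
    constructor
    · rintro (⟨u, v, hb, rfl⟩ | ⟨u, v, hb, rfl⟩)
      · exact ⟨u, v, by omega, rfl⟩
      · exact ⟨u, v, by omega, rfl⟩
    · rintro ⟨u, v, hb, rfl⟩
      by_cases h : |u| + |v| ≤ (r : Int)
      · exact Or.inl ⟨u, v, h, rfl⟩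
      · exact Or.inr ⟨u, v, by omega, rfl⟩

theorem nodup_pvPoints (x y : Int) (r : Nat) : (pvPoints x y r).Nodup := by
  induction r with
  | zero => simp [pvPoints]
  | succ r ih =>
    have hring_eq : (PySem.List.pyRange 0 ((r : Int) + 1) 1).flatMap (fun k =>
        [pvFmt (x + k) (y + ((r : Int) + 1 - k)), pvFmt (x + ((r : Int) + 1 - k)) (y - k),
         pvFmt (x - k) (y - ((r : Int) + 1 - k)), pvFmt (x - ((r : Int) + 1 - k)) (y + k)])
        = (pvOffs ((r : Int) + 1)).map (fun p => pvFmt (x + p.1) (y + p.2)) := by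
      rw [pvOffs, List.map_flatMap]
      refine List.flatMap_congr (fun k hk => ?_)
      simp [sub_eq_add_neg]
    simp only [pvPoints]
    rw [foldl_four, List.nil_append, List.nodup_append, hring_eq]
    refine ⟨ih, ?_, ?_⟩
    · refine List.Nodup.map_on ?_ (nodup_pvOffs _)
      intro p _ q _ h
      obtain ⟨h1, h2⟩ := pvFmt_inj h
      obtain ⟨p1, p2⟩ := p
      obtain ⟨q1, q2⟩ := q
      simp only at h1 h2
      simp only [Prod.mk.injEq]
      omega
    · intro a ha b hbm
      obtain ⟨u, v, hbnd, rfl⟩ := (mem_pvPoints x y r a).mp ha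
      rw [List.mem_map] at hbm
      obtain ⟨p, hp, heq⟩ := hbm
      have hpm := (mem_pvOffs ((r : Int) + 1) (by omega) p).mp hp
      intro hEq
      obtain ⟨h1, h2⟩ := pvFmt_inj (hEq.trans heq.symm)
      obtain ⟨p1, p2⟩ := p
      simp only at h1 h2 hpm
      have e1 : u = p1 := by omega
      have e2 : v = p2 := by omega
      rw [← e1, ← e2] at hpm
      omega

-- ===== VERDICT (by name: the statement is the Claim_ definition above) =====
theorem getNoBeaconCoords_spec : Claim_equal_getNoBeaconCoords := by
  intro source distance _
  unfold Spec_getNoBeaconCoords getNoBeaconCoords getNoBeaconCoords_alt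
  obtain ⟨x, y⟩ := source
  by_cases hneg : distance < 0
  · rw [PySem.List.pyRange_one_eq_nil (a := (0:Int)) (by omega)]
    simp only [List.foldl_nil]
    rfl
  · have hd : ((distance.toNat : Nat) : Int) = distance := Int.toNat_of_nonneg (by omega)
    simp only
    rw [show distance + 1 = ((distance.toNat : Nat) : Int) + 1 by omega, alt_fold_eq]
    apply PySem.List.sorted_eq_sorted_of_perm _ _ _ (fun a b h => h)
    rw [List.perm_ext_iff_of_nodup
      (nodup_outer_fold _ _ _ _ _ (by simp [PySem.Set.empty]))
      (nodup_pvPoints x y distance.toNat)]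
    intro a
    rw [mem_outer_fold, mem_pvPoints, hd]
    simpa [PySem.Set.empty] using mem_A_iff x y distance a
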